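/-
  DECODE-TIME STORES: the separation clause, and THE lemma every decode-time unit applies once per batch of stores.
  (The overview is in the header of Vorbis/Invariant/Config.lean; design/INVARIANTS-errata.md E-3 says why the clause exists.)

      SampleBuf Blk mem f C       `C` is a sample buffer: `channel_buffers[c]`, `previous_window[c]`, or an allocated block at `finalY[c]`
      Separated Blk mem f         every block CONFIG reads is disjoint from `*f` and from every sample buffer; the buffers are disjoint
                                  from `*f`.  `Separated.of_ne`: from "they are different allocated blocks" (`BlkOK.apart`)
      InHole f s                  the span lies in one of the decode-time holes of `*f`
      StoreOK Blk mem f s         what a decode-time store may hit: `.hole` | `.buffer C hC h1 h2` | `.off` (disjoint from every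
                                  allocated block: the temp block, the current stack frame, the output buffer when it is not in `Blk`)
      ConfigOK.frame_stores       CONFIG ∧ `Separated` ∧ a batch of `StoreOK` stores ⊢ CONFIG ∧ `Separated` in the new memory ∧ `DecodeSame`
-/
import Vorbis.Invariant.ReadsBack
namespace Vorbis
open X86 X86.User Asan

/-! ### The sample buffers, and the separation clause -/

/-- **`C` is one of the sample buffers** — the blocks whose CONTENTS decode-time code writes: `channel_buffers[c]` (`4·b1` bytes),
`previous_window[c]` (`2·b1` bytes), the allocated block at `finalY[c]` (its size is a ghost of FY1), `c < channels`. -/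
inductive SampleBuf (Blk : Block → Prop) (mem : Mem) (f : Nat) : Block → Prop
  /-- `channel_buffers[c]` -/
  | chan (c : Nat) (hc : (c : Int) < stb_vorbis.channels mem f) :
      SampleBuf Blk mem f ⟨stb_vorbis.channel_buffers mem f c, 4 * bsize mem f 1⟩
  /-- `previous_window[c]` -/
  | prev (c : Nat) (hc : (c : Int) < stb_vorbis.channels mem f) :
      SampleBuf Blk mem f ⟨stb_vorbis.previous_window mem f c, 2 * bsize mem f 1⟩
  /-- the block at `finalY[c]` -/
  | finalY (c : Nat) (hc : (c : Int) < stb_vorbis.channels mem f) (sz : Nat) (hb : Blk ⟨stb_vorbis.finalY mem f c, sz⟩) :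
      SampleBuf Blk mem f ⟨stb_vorbis.finalY mem f c, sz⟩

/-- A sample buffer is an allocated block (M6, FY1). -/
theorem SampleBuf.blk {Blk : Block → Prop} {mem : Mem} {f : Nat} {C : Block} (h : ConfigOK Blk mem f)
    (hC : SampleBuf Blk mem f C) : Blk C := by
  cases hC with
  | chan c hc => exact (h.m6 c hc).1
  | prev c hc => exact (h.m6 c hc).2
  | finalY c hc sz hb => exact hb

/-- The sample buffers are the same blocks in the new state: the pointers and `blocksize_1` are read inside `ConfigOK.wins`.
`hfy`: a block at a `finalY[c]` that is allocated in the new predicate was allocated in the old one (same predicate: trivial). -/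
theorem SampleBuf.back {Blk Blk' : Block → Prop} {mem mem' : Mem} {p f : Nat} {C : Block}
    (he : ObjEq ConfigOK.wins mem p mem' f) (hC16 : stb_vorbis.channels mem p ≤ 16)
    (hfy : ∀ (c sz : Nat), (c : Int) < stb_vorbis.channels mem p → Blk' ⟨stb_vorbis.finalY mem p c, sz⟩ →
      Blk ⟨stb_vorbis.finalY mem p c, sz⟩)
    (hC : SampleBuf Blk' mem' f C) : SampleBuf Blk mem p C := by
  obtain ⟨ech, eb, eptr⟩ := ConfigOK.buffers_eq he hC16
  cases hC with
  | chan c hc =>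
    rw [ech] at hc
    rw [(eptr c hc).1, eb]
    exact SampleBuf.chan c hc
  | prev c hc =>
    rw [ech] at hc
    rw [(eptr c hc).2.1, eb]
    exact SampleBuf.prev c hc
  | finalY c hc sz hb =>
    rw [ech] at hc
    rw [(eptr c hc).2.2] at hb ⊢
    exact SampleBuf.finalY c hc sz (hfy c sz hc hb)

/-- **SEP, the separation clause** (design/INVARIANTS-errata.md E-3): the blocks whose content the configuration reads, the sample
buffers and `*f` are pairwise disjoint. A GHOST fact about the order of allocation; no store changes it. -/
structure Separated (Blk : Block → Prop) (mem : Mem) (f : Nat) : Prop where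
  /-- no configuration block meets `*f` -/
  obj : ∀ B, ConfigOK.Reads mem f B → B.disjoint (objBlock f)
  /-- no configuration block meets a sample buffer -/
  buf : ∀ B, ConfigOK.Reads mem f B → ∀ C, SampleBuf Blk mem f C → B.disjoint C
  /-- no sample buffer meets `*f` -/
  bufobj : ∀ C, SampleBuf Blk mem f C → C.disjoint (objBlock f)

/-- **Establishing SEP**: all these blocks are allocated blocks, so it is enough that they are DIFFERENT blocks (`BlkOK.apart`):
each was returned by its own `setup_malloc` call (`ArenaOK.block_apart`: two setup blocks with different offsets), and while
`f = &p` the object is a stack object, not an arena block. -/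
theorem Separated.of_ne {Blk : Block → Prop} {mem : Mem} {f : Nat} (h : ConfigOK Blk mem f) (hok : BlkOK Blk)
    (hob : Blk (objBlock f)) (h1 : ∀ B, ConfigOK.Reads mem f B → B ≠ objBlock f)
    (h2 : ∀ B, ConfigOK.Reads mem f B → ∀ C, SampleBuf Blk mem f C → B ≠ C)
    (h3 : ∀ C, SampleBuf Blk mem f C → C ≠ objBlock f) : Separated Blk mem f :=
  ⟨fun B hR => hok.disjoint (h.reads_blk hR) hob (h1 B hR),
    fun B hR C hC => hok.disjoint (h.reads_blk hR) (SampleBuf.blk h hC) (h2 B hR C hC),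
    fun C hC => hok.disjoint (SampleBuf.blk h hC) hob (h3 C hC)⟩

/-- **SEP follows the object and the memory** as long as the configuration's pointers do: the two-address lemma. `hobj`: the new
place of the object is disjoint from the old blocks (the fresh copy of `*f = p`: `Move.fresh`); `hne1`, `hne2`: the old object is
none of the blocks (it is a stack object, they are arena blocks); `hfy`: see `SampleBuf.back`. -/
theorem Separated.transfer {Blk Blk' : Block → Prop} {mem mem' : Mem} {p f : Nat} (hsep : Separated Blk mem p)
    (h : ConfigOK Blk mem p) (he : ObjEq ConfigOK.wins mem p mem' f)
    (hk : ∀ B, ConfigOK.Reads mem p B → B.Kept mem mem')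
    (hfy : ∀ (c sz : Nat), (c : Int) < stb_vorbis.channels mem p → Blk' ⟨stb_vorbis.finalY mem p c, sz⟩ →
      Blk ⟨stb_vorbis.finalY mem p c, sz⟩)
    (hobj : ∀ B, Blk B → B ≠ objBlock p → B.disjoint (objBlock f))
    (hne1 : ∀ B, ConfigOK.Reads mem p B → B ≠ objBlock p) (hne2 : ∀ C, SampleBuf Blk mem p C → C ≠ objBlock p) :
    Separated Blk' mem' f := by
  have hC16 := h.header.HD1.2
  refine ⟨?_, ?_, ?_⟩
  · intro B hR
    have hR' := h.reads_back he hk hR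
    exact hobj B (h.reads_blk hR') (hne1 B hR')
  · intro B hR C hC
    exact hsep.buf B (h.reads_back he hk hR) C (SampleBuf.back he hC16 hfy hC)
  · intro C hC
    have hC' := SampleBuf.back he hC16 hfy hC
    exact hobj C (SampleBuf.blk h hC') (hne2 C hC')

/-- SEP at the same address, for the same block predicate: the configuration's pointers did not change. -/
theorem Separated.frame {Blk : Block → Prop} {mem mem' : Mem} {f : Nat} (hsep : Separated Blk mem f)
    (h : ConfigOK Blk mem f) (he : ObjEq ConfigOK.wins mem f mem' f)
    (hk : ∀ B, ConfigOK.Reads mem f B → B.Kept mem mem') : Separated Blk mem' f := by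
  have hC16 := h.header.HD1.2
  have hfy : ∀ (c sz : Nat), (c : Int) < stb_vorbis.channels mem f → Blk ⟨stb_vorbis.finalY mem f c, sz⟩ →
      Blk ⟨stb_vorbis.finalY mem f c, sz⟩ := fun _ _ _ hb => hb
  refine ⟨?_, ?_, ?_⟩
  · intro B hR
    exact hsep.obj B (h.reads_back he hk hR)
  · intro B hR C hC
    exact hsep.buf B (h.reads_back he hk hR) C (SampleBuf.back he hC16 hfy hC)
  · intro C hC
    exact hsep.bufobj C (SampleBuf.back he hC16 hfy hC)

/-! ### What a decode-time store may hit -/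

/-- **The span lies inside one of the decode-time holes of `*f`**: `[48,56)` stream · `[80,112)` first_audio_page_offset, p_first,
p_last · `[132,144)` temp_offset, eof, error · `[1000,1128)` outputs · `[1256,1260)` previous_length · `[1392,1400)` current_loc,
current_loc_valid · `[1480,1808)` the paging, bit-reader and window fields. -/
def InHole (f : Nat) (s : Span) : Prop :=
  (f + 48 ≤ s.lo ∧ s.hi ≤ f + 56) ∨ (f + 80 ≤ s.lo ∧ s.hi ≤ f + 112) ∨ (f + 132 ≤ s.lo ∧ s.hi ≤ f + 144) ∨
    (f + 1000 ≤ s.lo ∧ s.hi ≤ f + 1128) ∨ (f + 1256 ≤ s.lo ∧ s.hi ≤ f + 1260) ∨ (f + 1392 ≤ s.lo ∧ s.hi ≤ f + 1400) ∨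
    (f + 1480 ≤ s.lo ∧ s.hi ≤ f + 1808)

/-- A field of `*f` at offset `off`, `k` bytes, that lies in a hole: how a worker states "this store goes to `f->valid_bits`". -/
theorem InHole.of_field (f off k : Nat)
    (h : (48 ≤ off ∧ off + k ≤ 56) ∨ (80 ≤ off ∧ off + k ≤ 112) ∨ (132 ≤ off ∧ off + k ≤ 144) ∨ (1000 ≤ off ∧ off + k ≤ 1128) ∨
      (1256 ≤ off ∧ off + k ≤ 1260) ∨ (1392 ≤ off ∧ off + k ≤ 1400) ∨ (1480 ≤ off ∧ off + k ≤ 1808)) :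
    InHole f ⟨f + off, f + off + k⟩ := by
  unfold InHole
  simp only []
  omega

/-- **What a span of a decode-time footprint may be.** -/
inductive StoreOK (Blk : Block → Prop) (mem : Mem) (f : Nat) (s : Span) : Prop
  /-- a mutable field of `*f` -/
  | hole (h : InHole f s) : StoreOK Blk mem f s
  /-- inside a sample buffer -/
  | buffer (C : Block) (hC : SampleBuf Blk mem f C) (h1 : C.base ≤ s.lo) (h2 : s.hi ≤ C.base + C.size) : StoreOK Blk mem f s
  /-- off every allocated block: the temp block (`ArenaOK.blk_tblock_disjoint`), the current stack frame
  (`ArenaOK.blk_off_stack`), any object that is not in `Blk` -/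
  | off (h : ∀ B, Blk B → B.base + B.size ≤ s.lo ∨ s.hi ≤ B.base) : StoreOK Blk mem f s

/-- A batch of `StoreOK` stores keeps `*f` outside its decode-time holes. -/
theorem StoreOK.decodeSame {Blk : Block → Prop} {mem mem' : Mem} {f : Nat} (hok : BlkOK Blk)
    (hob : Blk (objBlock f)) (hsep : Separated Blk mem f) {spans : List Span} (hs : Mem.SameExcept spans mem mem')
    (hw : ∀ s, s ∈ spans → StoreOK Blk mem f s) : DecodeSame f mem mem' := by
  have hin := hok.inside _ hob
  simp only [vblock, voff] at hin
  apply DecodeSame.of_sameExcept hs (by simp only [voff]; omega)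
  intro s hsp
  cases hw s hsp with
  | hole hh =>
    unfold InHole at hh
    omega
  | buffer C hC h1 h2 =>
    have hd := hsep.bufobj C hC
    simp only [vblock, voff] at hd
    omega
  | off hoff =>
    have hd := hoff _ hob
    simp only [vblock, voff] at hd
    omega

/-- A batch of `StoreOK` stores keeps every block the configuration reads. -/
theorem StoreOK.reads_kept {Blk : Block → Prop} {mem mem' : Mem} {f : Nat} (h : ConfigOK Blk mem f) (hok : BlkOK Blk)
    (hsep : Separated Blk mem f) {spans : List Span} (hs : Mem.SameExcept spans mem mem')
    (hw : ∀ s, s ∈ spans → StoreOK Blk mem f s) (B : Block) (hR : ConfigOK.Reads mem f B) : B.Kept mem mem' := by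
  have hB := h.reads_blk hR
  apply Block.Kept.of_sameExcept hs _ (hok.no_wrap hB)
  intro s hsp
  cases hw s hsp with
  | hole hh =>
    have hd := hsep.obj B hR
    unfold InHole at hh
    simp only [vblock, voff] at hd
    omega
  | buffer C hC h1 h2 =>
    have hd := hsep.buf B hR C hC
    simp only [vblock] at hd
    omega
  | off hoff => exact hoff B hB

/-- **THE LEMMA A DECODE-TIME UNIT APPLIES ONCE PER BATCH OF STORES.** From the walker's `Mem.SameExcept spans mem mem'` and, for every
span, where it lies (`StoreOK`): the CONFIG part of the invariant and the separation clause hold in the new memory, and `*f` is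
unchanged outside its decode-time holes (the `DecodeSame` with which the function then re-establishes `Bits`, W1, M7, ADO from
its own stores). -/
theorem ConfigOK.frame_stores {Blk : Block → Prop} {mem mem' : Mem} {f : Nat} (h : ConfigOK Blk mem f) (hok : BlkOK Blk)
    (hob : Blk (objBlock f)) (hsep : Separated Blk mem f) {spans : List Span} (hs : Mem.SameExcept spans mem mem')
    (hw : ∀ s, s ∈ spans → StoreOK Blk mem f s) :
    ConfigOK Blk mem' f ∧ Separated Blk mem' f ∧ DecodeSame f mem mem' := by
  have hd := StoreOK.decodeSame hok hob hsep hs hw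
  have hk := StoreOK.reads_kept h hok hsep hs hw
  exact ⟨h.frame_decode hd hk, hsep.frame h (hd.sub ConfigOK.wins_decode) hk, hd⟩

/-- **ONE store of the walker**, `mem.writeLE (addr b) k v`: the instance of `frame_stores` with one span. -/
theorem ConfigOK.frame_store {Blk : Block → Prop} {mem : Mem} {f : Nat} (h : ConfigOK Blk mem f) (hok : BlkOK Blk)
    (hob : Blk (objBlock f)) (hsep : Separated Blk mem f) (b k v : Nat) (hb : b + k < 2 ^ 64)
    (hw : StoreOK Blk mem f ⟨b, b + k⟩) :
    ConfigOK Blk (mem.writeLE (addr b) k v) f ∧ Separated Blk (mem.writeLE (addr b) k v) f ∧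
      DecodeSame f mem (mem.writeLE (addr b) k v) := by
  have e : (addr b).toNat = b := toNat_addr b (by omega)
  apply h.frame_stores hok hob hsep (spans := [⟨b, b + k⟩])
  · apply Mem.SameExcept.writeLE
    · rw [e]
      exact hb
    · exact ⟨⟨b, b + k⟩, List.mem_singleton.mpr rfl, by rw [e]; exact Nat.le_refl _, by rw [e]; exact Nat.le_refl _⟩
  · intro s hsp
    rw [List.mem_singleton.mp hsp]
    exact hw

end Vorbis
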